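-- pv_equiv track=rewrite | github.com/arturoornelasb/tibia-bonelord-469-cipher | lz_units.py | build_token_dict
-- ===== SOURCE A (Python) =====
-- from collections import Counter, defaultdict
--
-- def build_token_dict(text, min_freq=10, max_len=6):
--     """Build a dictionary of frequent substrings."""
--     tokens = {}
--     for length in range(max_len, 0, -1):
--         freq = Counter()
--         for i in range(len(text) - length + 1):
--             sub = text[i:i+length]
--             freq[sub] += 1
--
--         for sub, count in freq.items():
--             if count >= min_freq and sub not in tokens:
--                 tokens[sub] = count
--
--     return tokens
-- ===== SOURCE B (Python) =====
-- from collections import Counter, defaultdict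
--
-- def build_token_dict(text, min_freq=10, max_len=6):
--     """Build a dictionary of frequent substrings via one global substring counter."""
--     counts = Counter()
--     n = len(text)
--     for i in range(n):
--         for length in range(1, min(max_len, n - i) + 1):
--             counts[text[i:i+length]] += 1
--     by_len = defaultdict(list)
--     for sub, c in counts.items():
--         by_len[len(sub)].append((sub, c))
--     tokens = {}
--     for length in range(max_len, 0, -1):
--         for sub, c in by_len[length]:
--             if c >= min_freq:
--                 tokens[sub] = c
--     return tokens
-- ===== Notes on version B (the rewrite author's own statement) =====
-- stated objective: alternative
-- what changed: Replaces A's per-length Counter passes and its cross-length membership test on the result dict by one global Counter over the substrings of every length (built position-outer, length-inner), whose items are then grouped into per-length buckets that the output loop drains in descending length order.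
import Mathlib
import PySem

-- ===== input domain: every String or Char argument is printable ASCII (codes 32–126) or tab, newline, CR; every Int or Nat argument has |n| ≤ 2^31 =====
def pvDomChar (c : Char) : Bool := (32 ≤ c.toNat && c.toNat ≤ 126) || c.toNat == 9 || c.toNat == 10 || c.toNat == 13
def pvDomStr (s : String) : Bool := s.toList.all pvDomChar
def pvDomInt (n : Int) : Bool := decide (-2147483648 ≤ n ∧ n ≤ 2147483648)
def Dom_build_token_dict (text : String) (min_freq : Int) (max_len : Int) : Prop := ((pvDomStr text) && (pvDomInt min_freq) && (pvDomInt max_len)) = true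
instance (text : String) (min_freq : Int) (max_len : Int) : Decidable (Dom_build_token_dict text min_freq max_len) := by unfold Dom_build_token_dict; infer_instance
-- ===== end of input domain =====

-- B replaces A's per-length Counter passes and its cross-length membership test by ONE
-- global counter over all substrings of every length (position-outer / length-inner),
-- whose items are then grouped into buckets by length; same exact result ('alternative').

-- ===== PORT A =====
-- Step of A's outer loop over `length`: build a Counter of the substrings of that
-- length, then add the frequent ones not yet present.
def pvAstep (text : String) (min_freq : Int) (tokens : PySem.Dict String Int) (length : Int) : PySem.Dict String Int :=
  let freq : PySem.Dict String Int :=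
    (PySem.List.pyRange 0 (PySem.Str.len text - length + 1) 1).foldl
      (fun d i => d.modify (PySem.Str.slice text (some i) (some (i + length))) 0 (· + 1))
      PySem.Dict.empty
  freq.items.foldl
    (fun t p => if min_freq ≤ p.2 ∧ ¬ t.contains p.1 then t.insert p.1 p.2 else t)
    tokens

def build_token_dict (text : String) (min_freq : Int) (max_len : Int) : List (String × Int) :=
  ((PySem.List.pyRange max_len 0 (-1)).foldl (pvAstep text min_freq) PySem.Dict.empty).items

-- ===== PORT B =====
-- B's first phase: one global counter over the substrings of every length 1..max_len,
-- position-outer / length-inner (the length clipped so only full-length slices count).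
def pvBcounts (text : String) (max_len : Int) : PySem.Dict String Int :=
  (PySem.List.pyRange 0 (PySem.Str.len text) 1).foldl
    (fun d i =>
      (PySem.List.pyRange 1 (min max_len (PySem.Str.len text - i) + 1) 1).foldl
        (fun d length => d.modify (PySem.Str.slice text (some i) (some (i + length))) 0 (· + 1))
        d)
    PySem.Dict.empty

-- B's second phase: group the counter's items into buckets by substring length.
def pvBgroup (text : String) (max_len : Int) : PySem.Dict Int (List (String × Int)) :=
  (pvBcounts text max_len).items.foldl
    (fun d p => d.modify (PySem.Str.len p.1) [] (· ++ [p]))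
    PySem.Dict.empty

-- B's third phase: for each length (descending), keep the frequent entries of its bucket.
def build_token_dict_alt (text : String) (min_freq : Int) (max_len : Int) : List (String × Int) :=
  ((PySem.List.pyRange max_len 0 (-1)).foldl
      (fun tokens length =>
        ((pvBgroup text max_len).getD length []).foldl
          (fun t p => if min_freq ≤ p.2 then t.insert p.1 p.2 else t)
          tokens)
      PySem.Dict.empty).items

-- ===== PRECONDITION & SPEC =====
def Spec_build_token_dict (text : String) (min_freq : Int) (max_len : Int) (out : List (String × Int)) : Prop := out = build_token_dict_alt text min_freq max_len
instance (text : String) (min_freq : Int) (max_len : Int) (out : List (String × Int)) : Decidable (Spec_build_token_dict text min_freq max_len out) := by unfold Spec_build_token_dict; infer_instance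

-- ===== CLAIM (what is proved, stated in full; the proofs are below) =====
def Claim_equal_build_token_dict : Prop := ∀ (text : String) (min_freq : Int) (max_len : Int), Dom_build_token_dict text min_freq max_len → Spec_build_token_dict text min_freq max_len (build_token_dict text min_freq max_len)

-- ===== LEMMAS AND PROOFS =====

-- proof-layer definitions
def pvSub (text : String) (L i : Int) : String := PySem.Str.slice text (some i) (some (i + L))
def pvN (text : String) (L : Int) : Int := PySem.Str.len text - L + 1
def pvSubs (text : String) (L : Int) : List String := (PySem.List.pyRange 0 (pvN text L) 1).map (pvSub text L)
def pvCnt (text : String) (L : Int) (k : String) : Int := (List.count k (pvSubs text L) : Int)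
def pvIns (min_freq : Int) (t : PySem.Dict String Int) (p : String × Int) : PySem.Dict String Int :=
  if min_freq ≤ p.2 then t.insert p.1 p.2 else t
-- all substrings B's counting phase inserts, in its traversal order
def pvBig (text : String) (max_len : Int) : List String :=
  (PySem.List.pyRange 0 (PySem.Str.len text) 1).flatMap
    (fun i => (PySem.List.pyRange 1 (min max_len (PySem.Str.len text - i) + 1) 1).map
      (fun L => pvSub text L i))
-- the common normal form of one output step for length L
def pvStepNF (text : String) (min_freq L : Int) (t : PySem.Dict String Int) : PySem.Dict String Int :=
  ((PySem.Set.ofList (pvSubs text L)).map (fun k => (k, pvCnt text L k))).foldl (pvIns min_freq) t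

lemma pvSub_toList (text : String) {L i : Int} (hL : 0 ≤ L) (hi : 0 ≤ i) :
    (pvSub text L i).toList = (text.toList.drop i.toNat).take L.toNat := by
  unfold pvSub
  rw [PySem.Str.toList_slice, PySem.Chars.slice_eq_listSlice,
    PySem.List.slice_toNat text.toList hi (by omega : (0:Int) ≤ i + L)]
  congr 1
  omega

lemma pvSub_length (text : String) {L i : Int} (hL : 1 ≤ L) (hi : 0 ≤ i) (hiN : i < pvN text L) :
    (pvSub text L i).toList.length = L.toNat := by
  have h := pvSub_toList text (by omega : (0:Int) ≤ L) hi
  rw [h]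
  have hn : (pvN text L) = (text.toList.length : Int) - L + 1 := by
    unfold pvN; rw [PySem.Str.len_eq]
  simp only [List.length_take, List.length_drop]
  omega

lemma mem_pvSubs_iff (text : String) (L : Int) (k : String) :
    k ∈ pvSubs text L ↔ ∃ i, 0 ≤ i ∧ i < pvN text L ∧ k = pvSub text L i := by
  unfold pvSubs
  simp only [List.mem_map, PySem.List.mem_pyRange_one]
  constructor
  · rintro ⟨i, ⟨h1, h2⟩, rfl⟩; exact ⟨i, h1, h2, rfl⟩
  · rintro ⟨i, h1, h2, rfl⟩; exact ⟨i, ⟨h1, h2⟩, rfl⟩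

lemma pv_key_len_of_mem_subs (text : String) {L : Int} (hL : 1 ≤ L) {k : String}
    (hk : k ∈ pvSubs text L) : (k.toList.length : Int) = L := by
  rcases (mem_pvSubs_iff text L k).mp hk with ⟨i, h1, h2, rfl⟩
  rw [pvSub_length text hL h1 h2]
  omega

lemma pv_foldl_ins_nocontains (min_freq : Int) :
    ∀ (ps : List (String × Int)) (t : PySem.Dict String Int),
      (ps.map Prod.fst).Nodup → (∀ p ∈ ps, t.contains p.1 = false) →
      ps.foldl (fun t p => if min_freq ≤ p.2 ∧ ¬ t.contains p.1 then t.insert p.1 p.2 else t) t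
        = ps.foldl (pvIns min_freq) t := by
  intro ps
  induction ps with
  | nil => intro t _ _; rfl
  | cons p ps ih =>
    intro t hnd hnc
    simp only [List.map_cons, List.nodup_cons] at hnd
    have hp : t.contains p.1 = false := hnc p (List.mem_cons_self ..)
    simp only [List.foldl_cons]
    by_cases hm : min_freq ≤ p.2
    · rw [if_pos ⟨hm, by simp [hp]⟩]
      have : pvIns min_freq t p = t.insert p.1 p.2 := by unfold pvIns; rw [if_pos hm]
      rw [this]
      apply ih _ hnd.2
      intro q hq
      rw [PySem.Dict.contains_insert]
      have : (q.1 == p.1) = false := by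
        simp only [beq_eq_false_iff_ne, ne_eq]
        intro hqe
        exact hnd.1 (hqe ▸ List.mem_map_of_mem hq)
      rw [this, hnc q (List.mem_cons_of_mem _ hq)]; rfl
    · rw [if_neg (by tauto)]
      have : pvIns min_freq t p = t := by unfold pvIns; rw [if_neg hm]
      rw [this]
      exact ih _ hnd.2 fun q hq => hnc q (List.mem_cons_of_mem _ hq)

-- membership in the result of the filtered-insert fold
lemma pv_mem_foldl_pvIns (min_freq : Int) :
    ∀ (ps : List (String × Int)) (t : PySem.Dict String Int) (p : String × Int),
      p ∈ (ps.foldl (pvIns min_freq) t).items → p ∈ t.items ∨ p.1 ∈ ps.map Prod.fst := by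
  intro ps
  induction ps with
  | nil => intro t p hp; exact Or.inl hp
  | cons q ps ih =>
    intro t p hp
    simp only [List.foldl_cons] at hp
    rcases ih _ p hp with h | h
    · unfold pvIns at h
      by_cases hm : min_freq ≤ q.2
      · rw [if_pos hm] at h
        rcases (PySem.Dict.mem_items_insert _ _ _ _).mp h with h1 | h1
        · right; rw [h1]; simp
        · exact Or.inl h1.1
      · rw [if_neg hm] at h; exact Or.inl h
    · right; simp [h]

lemma pv_stepA_eq (text : String) (min_freq : Int) {L : Int} (hL : 1 ≤ L)
    (t : PySem.Dict String Int)
    (hinv : ∀ p ∈ t.items, L < (p.1.toList.length : Int)) :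
    pvAstep text min_freq t L = pvStepNF text min_freq L t := by
  unfold pvAstep pvStepNF
  have hfreq : (PySem.List.pyRange 0 (PySem.Str.len text - L + 1) 1).foldl
      (fun d i => d.modify (PySem.Str.slice text (some i) (some (i + L))) 0 (· + 1))
      PySem.Dict.empty = PySem.Dict.counter (pvSubs text L) := by
    rw [PySem.Dict.counter_eq_foldl]
    unfold pvSubs pvN
    rw [List.foldl_map]
    rfl
  rw [hfreq]
  simp only [PySem.Dict.items_counter]
  have hmapfst : ((PySem.Set.ofList (pvSubs text L)).map
      (fun k => (k, (List.count k (pvSubs text L) : Int)))).map Prod.fst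
      = PySem.Set.ofList (pvSubs text L) := by
    simp [List.map_map, Function.comp_def]
  have hcnt : (fun k => (k, (List.count k (pvSubs text L) : Int)))
      = fun k => (k, pvCnt text L k) := by rfl
  rw [hcnt] at hmapfst ⊢
  apply pv_foldl_ins_nocontains
  · rw [hmapfst]; exact PySem.Set.nodup_ofList _
  · intro p hp
    simp only [List.mem_map] at hp
    obtain ⟨k, hk, rfl⟩ := hp
    have hk' : k ∈ pvSubs text L := (PySem.Set.mem_ofList _ _).mp hk
    have hklen := pv_key_len_of_mem_subs text hL hk'
    rw [← Bool.not_eq_true, PySem.Dict.contains_iff_mem_keys]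
    intro hmem
    simp only [PySem.Dict.keys, List.mem_map] at hmem
    obtain ⟨q, hq, hqe⟩ := hmem
    have := hinv q hq
    rw [hqe] at this
    omega

-- ===== B-side lemmas =====

-- B's counting phase is the Counter of pvBig
lemma pv_counts_eq (text : String) (max_len : Int) :
    pvBcounts text max_len = PySem.Dict.counter (pvBig text max_len) := by
  unfold pvBcounts pvBig
  rw [PySem.Dict.counter_eq_foldl, List.foldl_flatMap]
  apply PySem.List.foldl_congr_mem
  intro d i _
  rw [List.foldl_map]
  rfl

-- dedup-keeping-first commutes with filter
lemma pv_set_filter {α : Type} [BEq α] [LawfulBEq α] (q : α → Bool) :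
    ∀ (l : List α), (PySem.Set.ofList l).filter q = PySem.Set.ofList (l.filter q) := by
  intro l
  induction l with
  | nil => rfl
  | cons x xs ih =>
    rw [PySem.Set.ofList_cons]
    have hdis : ∀ (s : List α), PySem.Set.discard s x = s.filter (fun y => !(y == x)) :=
      fun s => rfl
    by_cases hx : q x = true
    · have hcomm : (fun a => q a && !(a == x)) = (fun a => !(a == x) && q a) := by
        funext a; exact Bool.and_comm ..
      rw [List.filter_cons_of_pos hx, List.filter_cons_of_pos hx, PySem.Set.ofList_cons,
        ← ih, hdis, hdis, List.filter_filter, List.filter_filter, hcomm]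
    · have hfun : (fun a => q a && !(a == x)) = q := by
        funext a
        by_cases ha : a = x
        · subst ha; simp [hx]
        · simp [ha]
      rw [List.filter_cons_of_neg hx, List.filter_cons_of_neg hx, hdis,
        List.filter_filter, hfun, ih]

-- filtering a range to a single value
lemma pv_filter_range_eq : ∀ (m : Nat) (L : Int),
    (PySem.List.pyRange 1 ((m : Int) + 1) 1).filter (fun x => decide (x = L))
      = if 1 ≤ L ∧ L ≤ (m : Int) then [L] else [] := by
  intro m
  induction m with
  | zero =>
    intro L
    rw [PySem.List.pyRange_one_eq_nil (by omega)]
    rw [if_neg (by omega)]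
    rfl
  | succ m ih =>
    intro L
    have hc : ((m + 1 : Nat) : Int) + 1 = ((m : Int) + 1) + 1 := by push_cast; ring
    rw [hc, PySem.List.pyRange_one_succ_right (by omega), List.filter_append, ih]
    by_cases hL : L = (m : Int) + 1
    · subst hL
      rw [if_neg (show ¬ (1 ≤ (m : Int) + 1 ∧ (m : Int) + 1 ≤ (m : Int)) by omega),
        if_pos (show 1 ≤ (m : Int) + 1 ∧ (m : Int) + 1 ≤ ((m + 1 : Nat) : Int) by push_cast; omega)]
      simp
    · have hdec : (decide ((m : Int) + 1 = L)) = false := by simp; omega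
      simp only [List.filter_cons, List.filter_nil, hdec, Bool.false_eq_true, if_false]
      by_cases h1 : 1 ≤ L ∧ L ≤ (m : Int)
      · rw [if_pos h1,
          if_pos (show 1 ≤ L ∧ L ≤ ((m + 1 : Nat) : Int) by push_cast; omega)]
        simp
      · rw [if_neg h1,
          if_neg (show ¬ (1 ≤ L ∧ L ≤ ((m + 1 : Nat) : Int)) by push_cast; omega)]
        simp

-- a flatMap of singletons guarded by an upper bound on the index is a map over the cut range
lemma pv_flatMap_if (c : Int) (f : Int → String) : ∀ (n : Nat),
    (PySem.List.pyRange 0 (n : Int) 1).flatMap (fun i => if i < c then [f i] else [])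
      = (PySem.List.pyRange 0 (min (n : Int) c) 1).map f := by
  intro n
  induction n with
  | zero =>
    rw [PySem.List.pyRange_one_eq_nil (by omega), PySem.List.pyRange_one_eq_nil (by omega)]
    rfl
  | succ n ih =>
    have hc : ((n + 1 : Nat) : Int) = (n : Int) + 1 := by push_cast; ring
    rw [hc, PySem.List.pyRange_one_succ_right (by omega), List.flatMap_append, ih]
    by_cases hn : (n : Int) < c
    · have hmin : min ((n : Int) + 1) c = (n : Int) + 1 := by omega
      have hmin' : min (n : Int) c = (n : Int) := by omega
      rw [hmin, hmin', PySem.List.pyRange_one_succ_right (by omega), List.map_append]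
      simp [hn]
    · have hmin : min ((n : Int) + 1) c = min (n : Int) c := by omega
      rw [hmin]
      simp [hn]

-- the elements of pvBig of length L are exactly the length-L substrings, in order
lemma pv_big_filter (text : String) {max_len L : Int} (h1 : 1 ≤ L) (h2 : L ≤ max_len) :
    (pvBig text max_len).filter (fun s => decide (PySem.Str.len s = L)) = pvSubs text L := by
  unfold pvBig
  have hflat : ∀ (l : List Int) (g : Int → List String) (q : String → Bool),
      (l.flatMap g).filter q = l.flatMap (fun i => (g i).filter q) := by
    intro l g q
    induction l with
    | nil => rfl
    | cons x xs ih => simp [List.filter_append, ih]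
  rw [hflat]
  have hn : PySem.Str.len text = (text.toList.length : Int) := PySem.Str.len_eq text
  have hstep : ∀ i ∈ PySem.List.pyRange 0 (PySem.Str.len text) 1,
      ((PySem.List.pyRange 1 (min max_len (PySem.Str.len text - i) + 1) 1).map
          (fun L' => pvSub text L' i)).filter (fun s => decide (PySem.Str.len s = L))
        = if i < pvN text L then [pvSub text L i] else [] := by
    intro i hi
    rw [PySem.List.mem_pyRange_one] at hi
    rw [List.filter_map]
    have hm1 : 1 ≤ min max_len (PySem.Str.len text - i) + 1 := by omega
    have hpred : ∀ L' ∈ PySem.List.pyRange 1 (min max_len (PySem.Str.len text - i) + 1) 1,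
        ((fun s => decide (PySem.Str.len s = L)) ∘ (fun L' => pvSub text L' i)) L'
          = decide (L' = L) := by
      intro L' hL'
      rw [PySem.List.mem_pyRange_one] at hL'
      have hlen : (pvSub text L' i).toList.length = L'.toNat :=
        pvSub_length text (by omega) (by omega) (by unfold pvN; omega)
      simp only [Function.comp_apply, PySem.Str.len_eq, hlen]
      rw [show ((L'.toNat : Int)) = L' from by omega]
    rw [List.filter_congr hpred]
    have hm : min max_len (PySem.Str.len text - i) + 1
        = ((min max_len (PySem.Str.len text - i)).toNat : Int) + 1 := by omega
    rw [hm, pv_filter_range_eq]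
    by_cases hc2 : i < pvN text L
    · have hcnd : 1 ≤ L ∧ L ≤ ((min max_len (PySem.Str.len text - i)).toNat : Int) := by
        unfold pvN at hc2; omega
      rw [if_pos hcnd, if_pos hc2]
      rfl
    · have hcnd : ¬ (1 ≤ L ∧ L ≤ ((min max_len (PySem.Str.len text - i)).toNat : Int)) := by
        unfold pvN at hc2; omega
      rw [if_neg hcnd, if_neg hc2]
      rfl
  have hcong : ∀ (l : List Int) (g g' : Int → List String),
      (∀ i ∈ l, g i = g' i) → l.flatMap g = l.flatMap g' := by
    intro l g g' h
    induction l with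
    | nil => rfl
    | cons x xs ih =>
      simp only [List.flatMap_cons, h x (List.mem_cons_self ..)]
      rw [ih (fun i hi => h i (List.mem_cons_of_mem _ hi))]
  rw [hcong _ _ _ hstep, hn]
  have := pv_flatMap_if (pvN text L) (pvSub text L) text.toList.length
  rw [this]
  have hminN : min (text.toList.length : Int) (pvN text L) = pvN text L := by
    unfold pvN; omega
  rw [hminN]
  rfl

-- counter values: for a length-L substring, the global count is the per-length count
lemma pv_count_big (text : String) {max_len L : Int} (h1 : 1 ≤ L) (h2 : L ≤ max_len)
    {k : String} (hk : k ∈ pvSubs text L) :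
    (List.count k (pvBig text max_len) : Int) = pvCnt text L k := by
  have hlen : ((fun s => decide (PySem.Str.len s = L)) k) = true := by
    show decide (PySem.Str.len k = L) = true
    rw [PySem.Str.len_eq]
    exact decide_eq_true (pv_key_len_of_mem_subs text h1 hk)
  have := List.count_filter (p := fun s => decide (PySem.Str.len s = L))
    (a := k) (l := pvBig text max_len) hlen
  rw [← this, pv_big_filter text h1 h2]
  rfl

-- the length-L bucket holds exactly the counter's items of length L, in order
lemma pv_group_getD (text : String) (max_len L : Int) :
    (pvBgroup text max_len).getD L []
      = (pvBcounts text max_len).items.filter (fun p => PySem.Str.len p.1 == L) := by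
  unfold pvBgroup
  have hmap : (pvBcounts text max_len).items.foldl
      (fun d p => d.modify (PySem.Str.len p.1) [] (· ++ [p])) PySem.Dict.empty
      = ((pvBcounts text max_len).items.map (fun p => (PySem.Str.len p.1, p))).foldl
          (fun d q => d.modify q.1 [] (· ++ [q.2])) PySem.Dict.empty := by
    rw [List.foldl_map]
  rw [hmap, PySem.Dict.getD_foldl_modify_append]
  rw [List.filter_map]
  simp [Function.comp_def]

-- one output step of B equals the normal form
lemma pv_stepB_eq (text : String) (min_freq : Int) {max_len L : Int} (h1 : 1 ≤ L)
    (h2 : L ≤ max_len) (t : PySem.Dict String Int) :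
    ((pvBgroup text max_len).getD L []).foldl
      (fun t p => if min_freq ≤ p.2 then t.insert p.1 p.2 else t) t
      = pvStepNF text min_freq L t := by
  rw [pv_group_getD, pv_counts_eq, PySem.Dict.items_counter]
  have hbeq : (fun p : String × Int => PySem.Str.len p.1 == L)
      = fun p : String × Int => decide (PySem.Str.len p.1 = L) := by
    funext p; exact Bool.beq_eq_decide_eq ..
  rw [hbeq]
  have hfm : ((PySem.Set.ofList (pvBig text max_len)).map
        (fun k => (k, (List.count k (pvBig text max_len) : Int)))).filter
        (fun p => decide (PySem.Str.len p.1 = L))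
      = ((PySem.Set.ofList (pvBig text max_len)).filter
          (fun k => decide (PySem.Str.len k = L))).map
        (fun k => (k, (List.count k (pvBig text max_len) : Int))) := by
    rw [List.filter_map]
    rfl
  rw [hfm, pv_set_filter, pv_big_filter text h1 h2]
  unfold pvStepNF
  have hins : (fun (t : PySem.Dict String Int) (p : String × Int) =>
      if min_freq ≤ p.2 then t.insert p.1 p.2 else t) = pvIns min_freq := rfl
  rw [hins]
  congr 1
  apply List.map_congr_left
  intro k hk
  rw [pv_count_big text h1 h2 ((PySem.Set.mem_ofList _ _).mp hk)]

lemma pv_stepNF_inv (text : String) (min_freq : Int) {L : Int} (hL : 1 ≤ L)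
    (t : PySem.Dict String Int)
    (hinv : ∀ p ∈ t.items, L < (p.1.toList.length : Int)) :
    ∀ p ∈ (pvStepNF text min_freq L t).items, L - 1 < (p.1.toList.length : Int) := by
  intro p hp
  unfold pvStepNF at hp
  rcases pv_mem_foldl_pvIns min_freq _ _ _ hp with h | h
  · have := hinv p h; omega
  · simp only [List.map_map, Function.comp_def, List.mem_map] at h
    obtain ⟨k, hk, hke⟩ := h
    have := pv_key_len_of_mem_subs text hL ((PySem.Set.mem_ofList _ _).mp hk)
    rw [hke] at this
    omega

lemma pv_outer (text : String) (min_freq max_len : Int) :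
    ∀ (c : Nat), (c : Int) ≤ max_len →
      ∀ (t : PySem.Dict String Int),
      (∀ p ∈ t.items, (c : Int) < (p.1.toList.length : Int)) →
      (PySem.List.pyRange (c : Int) 0 (-1)).foldl (pvAstep text min_freq) t
        = (PySem.List.pyRange (c : Int) 0 (-1)).foldl
            (fun tokens length =>
              ((pvBgroup text max_len).getD length []).foldl
                (fun t p => if min_freq ≤ p.2 then t.insert p.1 p.2 else t)
                tokens)
            t := by
  intro c
  induction c with
  | zero =>
    intro _ t _
    rw [PySem.List.pyRange_neg_one_eq_nil (by omega)]
    rfl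
  | succ c ih =>
    intro hle t hinv
    have hc : PySem.List.pyRange ((c + 1 : Nat) : Int) 0 (-1)
        = ((c + 1 : Nat) : Int) :: PySem.List.pyRange (((c + 1 : Nat) : Int) - 1) 0 (-1) :=
      PySem.List.pyRange_neg_one_cons (by omega)
    have hc1 : (((c + 1 : Nat) : Int) - 1) = (c : Int) := by push_cast; omega
    rw [hc, hc1]
    simp only [List.foldl_cons]
    have hL : (1 : Int) ≤ ((c + 1 : Nat) : Int) := by omega
    have hinv' : ∀ p ∈ t.items, ((c + 1 : Nat) : Int) < (p.1.toList.length : Int) := hinv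
    rw [pv_stepA_eq text min_freq hL t hinv', pv_stepB_eq text min_freq hL (by exact_mod_cast hle) t]
    apply ih (by omega)
    intro p hp
    have := pv_stepNF_inv text min_freq hL t hinv' p hp
    omega

-- ===== VERDICT (by name: the statement is the Claim_ definition above) =====
theorem build_token_dict_spec : Claim_equal_build_token_dict := by
  intro text min_freq max_len _
  unfold Spec_build_token_dict build_token_dict build_token_dict_alt
  by_cases h : max_len ≤ 0
  · rw [PySem.List.pyRange_neg_one_eq_nil h]
    rfl
  · have hm : max_len = ((max_len.toNat : Nat) : Int) := by omega
    rw [hm, pv_outer text min_freq max_len max_len.toNat (by omega) PySem.Dict.empty ?_]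
    · rw [← hm]
    · intro p hp
      simp [PySem.Dict.empty] at hp
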